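-- pv_equiv track=rewrite | github.com/usrmaia/Vai-Vuado | Resolução - Equipe 0/RastrearEntrega.py | OrdemCronologica
-- ===== SOURCE A (Python) =====
-- def OrdemCronologica(estagio):
--     estagio = estagio.upper()
--     status = ['ACEITO', 'COLETADO', 'EM TRANSITO', 'ENTREGUE']
--     temp = ""
--
--     if estagio == "NEGADO":
--         return "NEGADO"
--
--     for x in status:
--         if x == estagio.upper():
--             temp += f"{x}"
--             return temp
--         temp += f"{x} -> "
-- ===== SOURCE B (Python) =====
-- def OrdemCronologica(estagio):
--     estagio = estagio.upper()
--     status = ['ACEITO', 'COLETADO', 'EM TRANSITO', 'ENTREGUE']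
--     if estagio == "NEGADO":
--         return "NEGADO"
--     if estagio in status:
--         return " -> ".join(status[:status.index(estagio) + 1])
--     return None
-- ===== Notes on version B (the rewrite author's own statement) =====
-- stated objective: simpler
-- what changed: Replaces the accumulate-while-scanning loop (building the arrow-joined prefix string step by step) with a position lookup followed by a slice-and-join of the status list; an unknown stage falls through to None as in A.
import Mathlib
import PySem

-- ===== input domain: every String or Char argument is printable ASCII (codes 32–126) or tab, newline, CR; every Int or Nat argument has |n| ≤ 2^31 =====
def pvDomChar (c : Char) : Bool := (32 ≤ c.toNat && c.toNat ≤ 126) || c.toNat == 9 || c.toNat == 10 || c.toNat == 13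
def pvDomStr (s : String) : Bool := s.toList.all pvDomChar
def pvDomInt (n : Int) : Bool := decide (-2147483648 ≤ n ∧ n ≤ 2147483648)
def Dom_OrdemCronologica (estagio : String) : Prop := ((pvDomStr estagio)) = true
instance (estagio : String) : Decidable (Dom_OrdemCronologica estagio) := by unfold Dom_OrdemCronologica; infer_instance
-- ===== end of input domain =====

-- B replaces A's accumulate-while-scanning loop by a position lookup plus slice-and-join (objective: simpler).
-- Both ports work over List Char via PySem.Chars/Str, exact on the ASCII domain.

-- ===== PORT A =====
def pvStatus : List String := ["ACEITO", "COLETADO", "EM TRANSITO", "ENTREGUE"]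

-- the 'for x in status' loop with accumulator temp; none = fall through (Python's implicit None)
def pvLoopA : List (List Char) → List Char → List Char → Option String
  | [], _, _ => none
  | x :: rest, e, temp =>
    if x = PySem.Chars.upper e then some (String.ofList (temp ++ x))
    else pvLoopA rest e (temp ++ x ++ " -> ".toList)

def OrdemCronologica (estagio : String) : Option String :=
  let e := PySem.Chars.upper estagio.toList
  if e = "NEGADO".toList then some "NEGADO"
  else pvLoopA (pvStatus.map String.toList) e []

-- ===== PORT B =====
def OrdemCronologica_alt (estagio : String) : Option String :=
  let e := PySem.Chars.upper estagio.toList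
  if e = "NEGADO".toList then some "NEGADO"
  else
    -- 'if estagio in status: return " -> ".join(status[:status.index(estagio)+1])' / fall-through None
    match PySem.List.index? (pvStatus.map String.toList) e with
    | some i => some (PySem.Str.join " -> " (PySem.List.slice pvStatus (some 0) (some ((i : Int) + 1))))
    | none => none

-- ===== PRECONDITION & SPEC =====
def Spec_OrdemCronologica (estagio : String) (out : Option String) : Prop := out = OrdemCronologica_alt estagio
instance (estagio : String) (out : Option String) : Decidable (Spec_OrdemCronologica estagio out) := by unfold Spec_OrdemCronologica; infer_instance

-- ===== CLAIM (what is proved, stated in full; the proofs are below) =====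
def Claim_equal_OrdemCronologica : Prop := ∀ (estagio : String), Dom_OrdemCronologica estagio → Spec_OrdemCronologica estagio (OrdemCronologica estagio)

-- ===== LEMMAS AND PROOFS =====

theorem pvUpperChar_idem (c : Char) :
    PySem.Chars.upperChar (PySem.Chars.upperChar c) = PySem.Chars.upperChar c := by
  unfold PySem.Chars.upperChar PySem.Chars.islower
  by_cases h : ('a' ≤ c ∧ c ≤ 'z')
  · obtain ⟨h1, h2⟩ := h
    have ha : 97 ≤ c.toNat := UInt32.le_iff_toNat_le.mp (Char.le_def.mp h1)
    have hb : c.toNat ≤ 122 := UInt32.le_iff_toNat_le.mp (Char.le_def.mp h2)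
    have hvalid : (c.toNat - 32).isValidChar := Or.inl (by omega)
    have hval : (Char.ofNat (c.toNat - 32)).toNat = c.toNat - 32 := by
      simp [Char.toNat_ofNat, hvalid]
    have hnot : ¬ ('a' ≤ Char.ofNat (c.toNat - 32)) := by
      intro hle
      have h97 : (97 : Nat) ≤ (Char.ofNat (c.toNat - 32)).toNat :=
        UInt32.le_iff_toNat_le.mp (Char.le_def.mp hle)
      omega
    simp [h1, h2, hnot]
  · have hd : (decide ('a' ≤ c) && decide (c ≤ 'z')) = false := by
      rcases not_and_or.mp h with h' | h' <;> simp [h']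
    simp [hd]

theorem pvUpper_idem (l : List Char) :
    PySem.Chars.upper (PySem.Chars.upper l) = PySem.Chars.upper l := by
  unfold PySem.Chars.upper
  simp [List.map_map, Function.comp, pvUpperChar_idem]

theorem pvCore_eq (u : List Char) (hu : PySem.Chars.upper u = u) (hneg : u ≠ "NEGADO".toList) :
    pvLoopA (pvStatus.map String.toList) u [] =
      (match PySem.List.index? (pvStatus.map String.toList) u with
       | some i => some (PySem.Str.join " -> " (PySem.List.slice pvStatus (some 0) (some ((i : Int) + 1))))
       | none => none) := by
  by_cases h1 : u = ['A', 'C', 'E', 'I', 'T', 'O']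
  · subst h1; decide
  · by_cases h2 : u = ['C', 'O', 'L', 'E', 'T', 'A', 'D', 'O']
    · subst h2; decide
    · by_cases h3 : u = ['E', 'M', ' ', 'T', 'R', 'A', 'N', 'S', 'I', 'T', 'O']
      · subst h3; decide
      · by_cases h4 : u = ['E', 'N', 'T', 'R', 'E', 'G', 'U', 'E']
        · subst h4; decide
        · have hmem : u ∉ pvStatus.map String.toList := by
            simp [pvStatus]
            exact ⟨h1, h2, h3, h4⟩
          rw [show PySem.List.index? (pvStatus.map String.toList) u = none from
            (PySem.List.index?_eq_none_iff _ _).mpr hmem]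
          simp only [pvStatus, List.map]
          simp [pvLoopA, hu, Ne.symm h1, Ne.symm h2, Ne.symm h3, Ne.symm h4]

-- ===== VERDICT (by name: the statement is the Claim_ definition above) =====
theorem OrdemCronologica_spec : Claim_equal_OrdemCronologica := by
  intro estagio _
  unfold Spec_OrdemCronologica OrdemCronologica OrdemCronologica_alt
  by_cases hneg : PySem.Chars.upper estagio.toList = "NEGADO".toList
  · simp [hneg]
  · simp only [hneg, if_false]
    exact pvCore_eq _ (pvUpper_idem _) hneg
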